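-- pv_equiv track=rewrite | github.com/tony409val/Knapsack-Problem-Solver | model_1_evaluation.py | greedy_decode
-- ===== SOURCE A (Python) =====
-- def greedy_decode(solution, weights, capacity):
--     total_weight = sum(solution[i] * weights[i] for i in range(len(weights)))
--
--     if total_weight <= capacity:
--         return solution  # Already feasible
--
--     # Sort items by weight and flip them one by one (remove largest weights first)
--     sorted_items = sorted(range(len(weights)), key=lambda k: weights[k], reverse=True)
--
--     for idx in sorted_items:
--         if solution[idx] == 1:
--             solution[idx] = 0  # Flip the decision
--             total_weight -= weights[idx]
--             if total_weight <= capacity: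
--                 break  # Stop flipping when feasible
--
--     return solution
-- ===== SOURCE B (Python) =====
-- def greedy_decode(solution, weights, capacity):
--     total_weight = sum(solution[i] * weights[i] for i in range(len(weights)))
--     while total_weight > capacity:
--         best = -1
--         for i in range(len(weights)):
--             if solution[i] == 1 and (best == -1 or weights[i] > weights[best]):
--                 best = i
--         if best == -1:
--             break
--         solution[best] = 0
--         total_weight -= weights[best]
--     return solution
-- ===== Notes on version B (the rewrite author's own statement) =====
-- stated objective: alternative
-- what changed: B removes A's global descending stable sort of all indices and instead repeats a single linear argmax scan over the still-selected items (heaviest first, ties to the smallest index), flipping one item per pass of the while loop until feasible.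
import Mathlib
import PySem

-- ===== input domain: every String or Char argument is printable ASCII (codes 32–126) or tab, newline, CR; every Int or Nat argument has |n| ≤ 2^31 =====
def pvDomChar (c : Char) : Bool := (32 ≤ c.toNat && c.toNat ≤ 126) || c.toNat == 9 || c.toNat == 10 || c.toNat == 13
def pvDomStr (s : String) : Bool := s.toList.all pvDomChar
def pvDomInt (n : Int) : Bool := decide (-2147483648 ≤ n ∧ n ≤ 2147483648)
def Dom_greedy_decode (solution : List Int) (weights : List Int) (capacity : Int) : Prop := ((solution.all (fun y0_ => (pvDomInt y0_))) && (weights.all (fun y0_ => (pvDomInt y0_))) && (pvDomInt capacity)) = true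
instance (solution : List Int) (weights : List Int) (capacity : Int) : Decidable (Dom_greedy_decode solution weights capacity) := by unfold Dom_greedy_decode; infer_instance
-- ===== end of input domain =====

-- B replaces A's global descending stable sort by a repeated linear argmax scan over the
-- still-selected items (objective: alternative decomposition, no sort). A mutates `solution`
-- in place and B performs the same in-place mutation; the claim is about the returned list.

-- ===== PORT A =====
-- the `for idx in sorted_items:` loop, with `break` modelled by returning early
def pvLoopA (w : List Int) (cap : Int) : List Int → List Int → Int → List Int
  | [], sol, _ => sol
  | idx :: rest, sol, tw =>
    if PySem.List.pyGetD sol idx 0 == 1 then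
      let sol' := PySem.List.pySetD sol idx 0
      let tw' := tw - PySem.List.pyGetD w idx 0
      if tw' ≤ cap then sol' else pvLoopA w cap rest sol' tw'
    else pvLoopA w cap rest sol tw

def greedy_decode (solution : List Int) (weights : List Int) (capacity : Int) : List Int :=
  let total_weight := (PySem.List.pyRange 0 (weights.length : Int) 1).foldl
      (fun acc i => acc + PySem.List.pyGetD solution i 0 * PySem.List.pyGetD weights i 0) 0
  if total_weight ≤ capacity then solution
  else
    let sorted_items := PySem.List.sorted (PySem.List.pyRange 0 (weights.length : Int) 1)
        (fun k => PySem.List.pyGetD weights k 0) true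
    pvLoopA weights capacity sorted_items solution total_weight

-- ===== PORT B =====
-- the inner `for i in range(len(weights))` argmax scan (best = -1 sentinel, as in Source B;
-- the Bool `||` mirrors Python's short-circuit `or`, so `weights[best]` is never read at best = -1)
def pvScan (sol : List Int) (w : List Int) : Int :=
  (PySem.List.pyRange 0 (w.length : Int) 1).foldl
    (fun best i =>
      if PySem.List.pyGetD sol i 0 == 1 &&
         (best == -1 || PySem.List.pyGetD w best 0 < PySem.List.pyGetD w i 0)
      then i else best) (-1)

-- the `while total_weight > capacity:` loop; the fuel `len(weights)+1` only makes the
-- recursion structural (each pass through the body clears one selected index < len(weights),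
-- so the Python while loop runs at most len(weights)+1 times)
def pvLoopB (w : List Int) (cap : Int) : Nat → List Int → Int → List Int
  | 0, sol, _ => sol
  | fuel + 1, sol, tw =>
    if tw ≤ cap then sol
    else
      let best := pvScan sol w
      if best == -1 then sol
      else pvLoopB w cap fuel (PySem.List.pySetD sol best 0) (tw - PySem.List.pyGetD w best 0)

def greedy_decode_alt (solution : List Int) (weights : List Int) (capacity : Int) : List Int :=
  let total_weight := (PySem.List.pyRange 0 (weights.length : Int) 1).foldl
      (fun acc i => acc + PySem.List.pyGetD solution i 0 * PySem.List.pyGetD weights i 0) 0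
  pvLoopB weights capacity (weights.length + 1) solution total_weight

-- ===== PRECONDITION & SPEC =====
-- Pre_ excludes only the inputs where `solution` is shorter than `weights`: there A's very
-- first line `solution[i] * weights[i]` raises IndexError (and B raises likewise).
def Pre_greedy_decode (solution : List Int) (weights : List Int) (capacity : Int) : Prop :=
  weights.length ≤ solution.length
instance (solution : List Int) (weights : List Int) (capacity : Int) : Decidable (Pre_greedy_decode solution weights capacity) := by unfold Pre_greedy_decode; infer_instance

def pvWitness_greedy_decode : List Int × List Int × Int := ([1, 1, 0], [3, 2, 5], 4)

def Spec_greedy_decode (solution : List Int) (weights : List Int) (capacity : Int) (out : List Int) : Prop := out = greedy_decode_alt solution weights capacity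
instance (solution : List Int) (weights : List Int) (capacity : Int) (out : List Int) : Decidable (Spec_greedy_decode solution weights capacity out) := by unfold Spec_greedy_decode; infer_instance

-- ===== CLAIM (what is proved, stated in full; the proofs are below) =====
def Claim_equal_greedy_decode : Prop := ∀ (solution : List Int) (weights : List Int) (capacity : Int), Dom_greedy_decode solution weights capacity → Pre_greedy_decode solution weights capacity → Spec_greedy_decode solution weights capacity (greedy_decode solution weights capacity)

-- ===== LEMMAS AND PROOFS =====

-- A's stable descending sort orders indices by the strict lexicographic order
-- "heavier first, ties broken towards the smaller index"
def pvLexGT (w : List Int) (a b : Int) : Prop :=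
  PySem.List.pyGetD w b 0 < PySem.List.pyGetD w a 0 ∨
  (PySem.List.pyGetD w a 0 = PySem.List.pyGetD w b 0 ∧ a < b)

theorem pvLexGT_asymm {w : List Int} {a b : Int} (h1 : pvLexGT w a b) (h2 : pvLexGT w b a) : False := by
  rcases h1 with h1 | ⟨h1, h1'⟩ <;> rcases h2 with h2 | ⟨h2, h2'⟩ <;> omega

theorem pvRange_length (n : Nat) : (PySem.List.pyRange 0 (n : Int) 1).length = n := by
  induction n with
  | zero => decide
  | succ m ih =>
    rw [show ((m + 1 : Nat) : Int) = (m : Int) + 1 by push_cast; ring,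
       PySem.List.pyRange_one_succ_right (by positivity)]
    simp [ih]

-- index/update bridge on Int indices
theorem pvGetD_setD (xs : List Int) (i j v d : Int) (h0 : 0 ≤ i) (h1 : i < (xs.length : Int))
    (h2 : 0 ≤ j) :
    PySem.List.pyGetD (PySem.List.pySetD xs i v) j d = if j = i then v else PySem.List.pyGetD xs j d := by
  have hi : i = ((i.toNat : Nat) : Int) := by omega
  have hj : j = ((j.toNat : Nat) : Int) := by omega
  rw [hi, hj, PySem.List.pyGetD_pySetD_natCast xs i.toNat j.toNat v d (by omega)]
  rw [if_congr (show (j.toNat = i.toNat) ↔ (((j.toNat : Nat) : Int) = ((i.toNat : Nat) : Int)) by omega) rfl rfl]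

-- B's argmax scan over range(m): -1 iff nothing is selected below m, otherwise the
-- pvLexGT-greatest selected index below m (smallest index among the heaviest)
def pvScanN (sol w : List Int) (m : Nat) : Int :=
  (PySem.List.pyRange 0 (m : Int) 1).foldl
    (fun best i =>
      if PySem.List.pyGetD sol i 0 == 1 &&
         (best == -1 || PySem.List.pyGetD w best 0 < PySem.List.pyGetD w i 0)
      then i else best) (-1)

theorem pvScan_eq_pvScanN (sol w : List Int) : pvScan sol w = pvScanN sol w w.length := rfl

theorem pvScanN_char (sol w : List Int) (m : Nat) :
    (pvScanN sol w m = -1 ∧ ∀ j : Int, 0 ≤ j → j < (m : Int) → PySem.List.pyGetD sol j 0 ≠ 1) ∨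
    (0 ≤ pvScanN sol w m ∧ pvScanN sol w m < (m : Int) ∧
      PySem.List.pyGetD sol (pvScanN sol w m) 0 = 1 ∧
      ∀ j : Int, 0 ≤ j → j < (m : Int) → PySem.List.pyGetD sol j 0 = 1 → j ≠ pvScanN sol w m →
        pvLexGT w (pvScanN sol w m) j) := by
  induction m with
  | zero =>
    left
    constructor
    · rfl
    · intro j hj hj'; omega
  | succ m ih =>
    have hstep : pvScanN sol w (m + 1) =
        (if PySem.List.pyGetD sol (m : Int) 0 == 1 &&
            (pvScanN sol w m == -1 ||
             PySem.List.pyGetD w (pvScanN sol w m) 0 < PySem.List.pyGetD w (m : Int) 0)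
         then (m : Int) else pvScanN sol w m) := by
      unfold pvScanN
      rw [show ((m + 1 : Nat) : Int) = (m : Int) + 1 by push_cast; ring,
         PySem.List.pyRange_one_succ_right (by positivity), List.foldl_append]
      rfl
    rcases ih with ⟨hr, hnone⟩ | ⟨hr0, hrm, hsel, hmax⟩
    · by_cases hs : PySem.List.pyGetD sol (m : Int) 0 = 1
      · right
        rw [hstep, hr, if_pos (by simp only [Bool.and_eq_true, Bool.or_eq_true, beq_iff_eq, decide_eq_true_eq]; refine ⟨hs, ?_⟩; simp)]
        refine ⟨by positivity, by omega, hs, ?_⟩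
        intro j hj hj' hjs hjne
        exfalso
        by_cases hcase : j < (m : Int)
        · exact hnone j hj hcase hjs
        · exact hjne (by omega)
      · left
        rw [hstep, if_neg (by simp only [Bool.and_eq_true, Bool.or_eq_true, beq_iff_eq, decide_eq_true_eq]; exact fun hc => hs hc.1)]
        refine ⟨hr, ?_⟩
        intro j hj hj'
        by_cases hcase : j < (m : Int)
        · exact hnone j hj hcase
        · rw [show j = (m : Int) by omega]; exact hs
    · have hne : (pvScanN sol w m == -1) = false := by
        simp only [beq_eq_false_iff_ne, ne_eq]; omega
      by_cases hs : PySem.List.pyGetD sol (m : Int) 0 = 1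
      · by_cases hlt : PySem.List.pyGetD w (pvScanN sol w m) 0 < PySem.List.pyGetD w (m : Int) 0
        · -- the new index m is strictly heavier: it becomes the argmax
          right
          rw [hstep, if_pos (by simp only [Bool.and_eq_true, Bool.or_eq_true, beq_iff_eq, decide_eq_true_eq]; exact ⟨hs, Or.inr hlt⟩)]
          refine ⟨by positivity, by omega, hs, ?_⟩
          intro j hj hj' hjs hjne
          by_cases hcase : j < (m : Int)
          · by_cases hjr : j = pvScanN sol w m
            · left; rw [hjr]; exact hlt
            · rcases hmax j hj hcase hjs hjr with h | ⟨h, h'⟩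
              · left; omega
              · left; omega
          · exact absurd (by omega : j = (m : Int)) hjne
        · -- m is not heavier: the old argmax survives (ties keep the smaller index)
          right
          rw [hstep, if_neg (by simp only [Bool.and_eq_true, Bool.or_eq_true, beq_iff_eq, decide_eq_true_eq]; rintro ⟨-, h | h⟩ <;> omega)]
          refine ⟨hr0, by omega, hsel, ?_⟩
          intro j hj hj' hjs hjne
          by_cases hcase : j < (m : Int)
          · exact hmax j hj hcase hjs hjne
          · rw [show j = (m : Int) by omega]
            by_cases heq : PySem.List.pyGetD w (pvScanN sol w m) 0 = PySem.List.pyGetD w (m : Int) 0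
            · right; exact ⟨heq, by omega⟩
            · left; omega
      · -- m not selected: nothing changes
        right
        rw [hstep, if_neg (by simp only [Bool.and_eq_true, Bool.or_eq_true, beq_iff_eq, decide_eq_true_eq]; exact fun hc => hs hc.1)]
        refine ⟨hr0, by omega, hsel, ?_⟩
        intro j hj hj' hjs hjne
        by_cases hcase : j < (m : Int)
        · exact hmax j hj hcase hjs hjne
        · rw [show j = (m : Int) by omega] at hjs; exact absurd hjs hs

-- inserting an index larger than everything present keeps the strict lexicographic order
theorem pvInsertBy_pairwise (w : List Int) (x : Int) :
    ∀ acc : List Int, acc.Pairwise (pvLexGT w) → (∀ y ∈ acc, y < x) →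
      (PySem.List.insertBy (fun a b => decide (PySem.List.pyGetD w b 0 < PySem.List.pyGetD w a 0)) x acc).Pairwise (pvLexGT w) := by
  intro acc
  induction acc with
  | nil => intro _ _; simp [PySem.List.insertBy]
  | cons y ys ih =>
    intro hp hlt
    rw [List.pairwise_cons] at hp
    obtain ⟨hy, hys⟩ := hp
    by_cases hb : PySem.List.pyGetD w y 0 < PySem.List.pyGetD w x 0
    · simp only [PySem.List.insertBy, hb, decide_true, if_true]
      refine List.Pairwise.cons ?_ (List.Pairwise.cons hy hys)
      intro z hz
      rcases List.mem_cons.mp hz with rfl | hz'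
      · left; exact hb
      · rcases hy z hz' with h | ⟨h, h'⟩
        · left; omega
        · left; omega
    · simp only [PySem.List.insertBy, hb, decide_false]
      refine List.Pairwise.cons ?_ (ih hys (fun z hz => hlt z (List.mem_cons_of_mem y hz)))
      intro z hz
      rcases (PySem.List.mem_insertBy _ x z ys).mp hz with rfl | hz'
      · by_cases heq : PySem.List.pyGetD w y 0 = PySem.List.pyGetD w z 0
        · right; exact ⟨heq, hlt y (List.mem_cons_self)⟩
        · left; omega
      · exact hy z hz'

theorem pvFoldl_ins (w : List Int) :
    ∀ (l acc : List Int), l.Pairwise (· < ·) → (∀ y ∈ acc, ∀ x ∈ l, y < x) →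
      acc.Pairwise (pvLexGT w) →
      (l.foldl (fun acc x => PySem.List.insertBy (fun a b => decide (PySem.List.pyGetD w b 0 < PySem.List.pyGetD w a 0)) x acc) acc).Pairwise (pvLexGT w) := by
  intro l
  induction l with
  | nil => intro acc _ _ hacc; simpa using hacc
  | cons x l' ih =>
    intro acc hl hmem hacc
    rw [List.pairwise_cons] at hl
    obtain ⟨hx, hl'⟩ := hl
    simp only [List.foldl_cons]
    refine ih _ hl' ?_ ?_
    · intro y hy z hz
      rcases (PySem.List.mem_insertBy _ x y acc).mp hy with rfl | hy'
      · exact hx z hz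
      · exact hmem y hy' z (List.mem_cons_of_mem x hz)
    · exact pvInsertBy_pairwise w x acc hacc (fun y hy => hmem y hy x List.mem_cons_self)

theorem pvSorted_lex (w : List Int) :
    (PySem.List.sorted (PySem.List.pyRange 0 (w.length : Int) 1)
      (fun k => PySem.List.pyGetD w k 0) true).Pairwise (pvLexGT w) := by
  rw [PySem.List.sorted_rev_eq_foldl_insertBy]
  exact pvFoldl_ins w _ [] (PySem.List.pairwise_lt_pyRange_one 0 _) (by simp) (by simp)

-- the main loop equivalence: A's walk down the sorted list = B's repeated argmax scan
theorem pvLoop_eq (w : List Int) (cap : Int) :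
    ∀ (rest sol : List Int) (tw : Int) (fuel : Nat),
      rest.Pairwise (pvLexGT w) →
      (∀ j ∈ rest, 0 ≤ j ∧ j < (w.length : Int)) →
      (∀ j : Int, 0 ≤ j → j < (w.length : Int) → PySem.List.pyGetD sol j 0 = 1 → j ∈ rest) →
      w.length ≤ sol.length →
      ¬ tw ≤ cap →
      rest.length + 1 ≤ fuel →
      pvLoopA w cap rest sol tw = pvLoopB w cap fuel sol tw := by
  intro rest
  induction rest with
  | nil =>
    intro sol tw fuel _ _ hsub _ htw hfuel
    obtain ⟨f, rfl⟩ : ∃ f, fuel = f + 1 := ⟨fuel - 1, by omega⟩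
    show sol = pvLoopB w cap (f + 1) sol tw
    rw [pvLoopB, if_neg htw]
    have hscan : pvScan sol w = -1 := by
      rw [pvScan_eq_pvScanN]
      rcases pvScanN_char sol w w.length with ⟨hr, _⟩ | ⟨hr0, hrm, hsel, _⟩
      · exact hr
      · exact absurd (hsub _ hr0 hrm hsel) (List.not_mem_nil)
    rw [hscan]
    rfl
  | cons idx rest' ih =>
    intro sol tw fuel hp hbnd hsub hlen htw hfuel
    rw [List.pairwise_cons] at hp
    obtain ⟨hidx, hp'⟩ := hp
    obtain ⟨f, rfl⟩ : ∃ f, fuel = f + 1 := ⟨fuel - 1, by omega⟩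
    by_cases hs : PySem.List.pyGetD sol idx 0 = 1
    · -- A flips idx; B's scan finds exactly idx
      have hib := hbnd idx List.mem_cons_self
      have hscan : pvScan sol w = idx := by
        rw [pvScan_eq_pvScanN]
        rcases pvScanN_char sol w w.length with ⟨_, hnone⟩ | ⟨hr0, hrm, hsel, hmax⟩
        · exact absurd hs (hnone idx hib.1 hib.2)
        · by_cases heq : pvScanN sol w w.length = idx
          · exact heq
          · exfalso
            have hrmem := hsub _ hr0 hrm hsel
            rcases List.mem_cons.mp hrmem with h | h
            · exact heq h
            · exact pvLexGT_asymm (hidx _ h) (hmax idx hib.1 hib.2 hs (fun hc => heq hc.symm))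
      have hA : pvLoopA w cap (idx :: rest') sol tw =
          (if tw - PySem.List.pyGetD w idx 0 ≤ cap then PySem.List.pySetD sol idx 0
           else pvLoopA w cap rest' (PySem.List.pySetD sol idx 0) (tw - PySem.List.pyGetD w idx 0)) := by
        rw [pvLoopA, if_pos (by simp [hs])]
      have hB : pvLoopB w cap (f + 1) sol tw =
          pvLoopB w cap f (PySem.List.pySetD sol idx 0) (tw - PySem.List.pyGetD w idx 0) := by
        rw [pvLoopB, if_neg htw]
        have hb : (idx == (-1 : Int)) = false := by
          simp only [beq_eq_false_iff_ne, ne_eq]; omega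
        simp only [hscan, hb, Bool.false_eq_true, if_false]
      rw [hA, hB]
      have hsub' : ∀ j : Int, 0 ≤ j → j < (w.length : Int) →
          PySem.List.pyGetD (PySem.List.pySetD sol idx 0) j 0 = 1 → j ∈ rest' := by
        intro j hj hj' hjs
        rw [pvGetD_setD sol idx j 0 0 hib.1 (by omega) hj] at hjs
        by_cases hji : j = idx
        · rw [if_pos hji] at hjs; omega
        · rw [if_neg hji] at hjs
          rcases List.mem_cons.mp (hsub j hj hj' hjs) with h | h
          · exact absurd h hji
          · exact h
      by_cases hcap : tw - PySem.List.pyGetD w idx 0 ≤ cap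
      · -- feasible after this flip: A breaks, B's next pass exits the while loop
        rw [if_pos hcap]
        obtain ⟨f', rfl⟩ : ∃ f', f = f' + 1 := ⟨f - 1, by simp at hfuel; omega⟩
        rw [pvLoopB, if_pos hcap]
      · rw [if_neg hcap]
        exact ih (PySem.List.pySetD sol idx 0) (tw - PySem.List.pyGetD w idx 0) f hp'
          (fun j hj => hbnd j (List.mem_cons_of_mem idx hj)) hsub'
          (by rw [PySem.List.length_pySetD]; exact hlen) hcap (by simp at hfuel ⊢; omega)
    · -- idx is not selected: A skips it, B's scan never sees it
      have hA : pvLoopA w cap (idx :: rest') sol tw = pvLoopA w cap rest' sol tw := by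
        rw [pvLoopA, if_neg (by simp [hs])]
      rw [hA]
      have hsub' : ∀ j : Int, 0 ≤ j → j < (w.length : Int) → PySem.List.pyGetD sol j 0 = 1 → j ∈ rest' := by
        intro j hj hj' hjs
        rcases List.mem_cons.mp (hsub j hj hj' hjs) with h | h
        · rw [h] at hjs; exact absurd hjs hs
        · exact h
      exact ih sol tw (f + 1) hp' (fun j hj => hbnd j (List.mem_cons_of_mem idx hj)) hsub' hlen htw
        (by simp at hfuel ⊢; omega)

-- ===== VERDICT (by name: the statement is the Claim_ definition above) =====
theorem greedy_decode_spec : Claim_equal_greedy_decode := by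
  intro solution weights capacity _ hpre
  show greedy_decode solution weights capacity = greedy_decode_alt solution weights capacity
  unfold greedy_decode greedy_decode_alt
  set tw := (PySem.List.pyRange 0 (weights.length : Int) 1).foldl
      (fun acc i => acc + PySem.List.pyGetD solution i 0 * PySem.List.pyGetD weights i 0) 0 with htw
  by_cases hcap : tw ≤ capacity
  · rw [if_pos hcap]
    show solution = pvLoopB weights capacity (weights.length + 1) solution tw
    rw [pvLoopB, if_pos hcap]
  · rw [if_neg hcap]
    refine pvLoop_eq weights capacity _ solution tw (weights.length + 1)
      (pvSorted_lex weights) ?_ ?_ hpre hcap ?_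
    · intro j hj
      rw [PySem.List.mem_sorted] at hj
      exact (PySem.List.mem_pyRange_one).mp hj
    · intro j hj hj' _
      rw [PySem.List.mem_sorted, PySem.List.mem_pyRange_one]
      exact ⟨hj, hj'⟩
    · rw [PySem.List.length_sorted, pvRange_length]
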